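-- pv_equiv track=rewrite | github.com/cward-snaplogic/roi-calculator | utils/data_processor.py | _derive_business_unit_from_content
-- ===== SOURCE A (Python) =====
-- def _derive_business_unit_from_content(row) -> str:
--     """Derive business unit from available data"""
--     # Look for business unit clues in title or description
--     title = str(row.get('title', '')).lower()
--     description = str(row.get('description', '')).lower()
--
--     # Common business unit keywords
--     if any(keyword in title + description for keyword in ['finance', 'accounting', 'revenue']):
--         return 'Finance'
--     elif any(keyword in title + description for keyword in ['support', 'customer', 'help']):
--         return 'Support'
--     elif any(keyword in title + description for keyword in ['sales', 'marketing', 'marketo']):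
--         return 'Sales & Marketing'
--     elif any(keyword in title + description for keyword in ['hr', 'human resources']):
--         return 'HR'
--     elif any(keyword in title + description for keyword in ['engineering', 'development', 'technical']):
--         return 'Engineering'
--     elif any(keyword in title + description for keyword in ['operations', 'ops']):
--         return 'Operations'
--     elif any(keyword in title + description for keyword in ['professional services', 'ps team']):
--         return 'Professional Services'
--     else:
--         return 'General'
-- ===== SOURCE B (Python) =====
-- # Flat keyword -> (priority, label) table; a single fold keeps the best
-- # (lowest-priority) matched label instead of an if/elif cascade per group.
-- KEYWORDS = [
--     ('finance', 0, 'Finance'), ('accounting', 0, 'Finance'), ('revenue', 0, 'Finance'),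
--     ('support', 1, 'Support'), ('customer', 1, 'Support'), ('help', 1, 'Support'),
--     ('sales', 2, 'Sales & Marketing'), ('marketing', 2, 'Sales & Marketing'), ('marketo', 2, 'Sales & Marketing'),
--     ('hr', 3, 'HR'), ('human resources', 3, 'HR'),
--     ('engineering', 4, 'Engineering'), ('development', 4, 'Engineering'), ('technical', 4, 'Engineering'),
--     ('operations', 5, 'Operations'), ('ops', 5, 'Operations'),
--     ('professional services', 6, 'Professional Services'), ('ps team', 6, 'Professional Services'),
-- ]
--
--
-- def _derive_business_unit_from_content(row) -> str:
--     """Derive business unit: min-priority accumulator over all matched keywords."""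
--     text = str(row.get('title', '')).lower() + str(row.get('description', '')).lower()
--     best = None
--     for kw, prio, label in KEYWORDS:
--         if kw in text and (best is None or prio < best[0]):
--             best = (prio, label)
--     return 'General' if best is None else best[1]
-- ===== Notes on version B (the rewrite author's own statement) =====
-- stated objective: alternative
-- what changed: The grouped if/elif cascade with early return is replaced by one exhaustive fold over a flat keyword->(priority,label) table that keeps the minimum-priority match in an accumulator; correctness follows because priorities encode the cascade's branch order.
import Mathlib
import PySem

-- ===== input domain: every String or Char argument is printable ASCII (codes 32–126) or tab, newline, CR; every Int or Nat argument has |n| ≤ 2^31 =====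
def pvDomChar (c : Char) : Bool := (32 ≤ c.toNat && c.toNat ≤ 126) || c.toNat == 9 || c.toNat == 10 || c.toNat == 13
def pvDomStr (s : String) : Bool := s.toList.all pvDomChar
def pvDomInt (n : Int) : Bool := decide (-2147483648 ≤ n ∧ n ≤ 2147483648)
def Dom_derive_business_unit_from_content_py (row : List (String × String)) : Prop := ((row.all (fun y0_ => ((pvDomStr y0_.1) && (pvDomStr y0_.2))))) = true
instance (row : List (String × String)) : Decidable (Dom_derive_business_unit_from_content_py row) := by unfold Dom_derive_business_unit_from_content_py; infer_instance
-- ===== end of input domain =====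

-- B replaces the if/elif cascade by one exhaustive fold over a flat keyword->(priority,label)
-- table keeping the minimum-priority match (alternative decomposition, same cost).


-- ===== PORT A =====
-- Port of A: the literal if/elif keyword cascade over title+description.
def derive_business_unit_from_content_py (row : List (String × String)) : String :=
  let title := PySem.Str.lower ((PySem.Dict.mk row).getD "title" "")
  let description := PySem.Str.lower ((PySem.Dict.mk row).getD "description" "")
  let td := title.toList ++ description.toList
  if ["finance", "accounting", "revenue"].any (fun k => PySem.Chars.isIn k.toList td) then "Finance"
  else if ["support", "customer", "help"].any (fun k => PySem.Chars.isIn k.toList td) then "Support"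
  else if ["sales", "marketing", "marketo"].any (fun k => PySem.Chars.isIn k.toList td) then "Sales & Marketing"
  else if ["hr", "human resources"].any (fun k => PySem.Chars.isIn k.toList td) then "HR"
  else if ["engineering", "development", "technical"].any (fun k => PySem.Chars.isIn k.toList td) then "Engineering"
  else if ["operations", "ops"].any (fun k => PySem.Chars.isIn k.toList td) then "Operations"
  else if ["professional services", "ps team"].any (fun k => PySem.Chars.isIn k.toList td) then "Professional Services"
  else "General"

-- ===== PORT B =====
-- Port of B: flat keyword table; one fold keeps the minimum-priority matched (priority, label).
def pvKeywords : List (String × Nat × String) :=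
  [ ("finance", 0, "Finance"), ("accounting", 0, "Finance"), ("revenue", 0, "Finance"),
    ("support", 1, "Support"), ("customer", 1, "Support"), ("help", 1, "Support"),
    ("sales", 2, "Sales & Marketing"), ("marketing", 2, "Sales & Marketing"), ("marketo", 2, "Sales & Marketing"),
    ("hr", 3, "HR"), ("human resources", 3, "HR"),
    ("engineering", 4, "Engineering"), ("development", 4, "Engineering"), ("technical", 4, "Engineering"),
    ("operations", 5, "Operations"), ("ops", 5, "Operations"),
    ("professional services", 6, "Professional Services"), ("ps team", 6, "Professional Services") ]

-- one loop iteration of Source B: update best if the keyword matches and its priority is lower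
def pvStep (t : List Char) (best : Option (Nat × String)) (e : String × Nat × String) : Option (Nat × String) :=
  if PySem.Chars.isIn e.1.toList t && (match best with | none => true | some (p, _) => decide (e.2.1 < p)) then
    some e.2
  else best

def derive_business_unit_from_content_py_alt (row : List (String × String)) : String :=
  let text := (PySem.Str.lower ((PySem.Dict.mk row).getD "title" "")).toList
      ++ (PySem.Str.lower ((PySem.Dict.mk row).getD "description" "")).toList
  match pvKeywords.foldl (pvStep text) none with
  | none => "General"
  | some (_, l) => l

-- ===== PRECONDITION & SPEC =====
def Spec_derive_business_unit_from_content_py (row : List (String × String)) (out : String) : Prop := out = derive_business_unit_from_content_py_alt row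
instance (row : List (String × String)) (out : String) : Decidable (Spec_derive_business_unit_from_content_py row out) := by unfold Spec_derive_business_unit_from_content_py; infer_instance

-- ===== CLAIM (what is proved, stated in full; the proofs are below) =====
def Claim_equal_derive_business_unit_from_content_py : Prop := ∀ (row : List (String × String)), Dom_derive_business_unit_from_content_py row → Spec_derive_business_unit_from_content_py row (derive_business_unit_from_content_py row)

-- ===== LEMMAS AND PROOFS =====

-- Once best is set to a priority no later entry beats, the fold never changes it.
theorem pv_stable (t : List Char) (p : Nat) (l : String) :
    ∀ (L : List (String × Nat × String)), (∀ e ∈ L, p ≤ e.2.1) →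
      L.foldl (pvStep t) (some (p, l)) = some (p, l)
  | [], _ => rfl
  | e :: L, h => by
      have hp : ¬ e.2.1 < p := Nat.not_lt.mpr (h e (List.mem_cons_self ..))
      have hstep : pvStep t (some (p, l)) e = some (p, l) := by
        simp [pvStep, hp]
      rw [List.foldl_cons, hstep]
      exact pv_stable t p l L (fun e' he' => h e' (List.mem_cons_of_mem _ he'))

-- Folding through a uniform-priority group either locks in its (p, l) (if any keyword
-- matches) or passes none on to the rest of the table.
theorem pv_fold_group (t : List Char) (p : Nat) (l : String) (ks : List String)
    (rest : List (String × Nat × String)) (hrest : ∀ e ∈ rest, p ≤ e.2.1) :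
    ((ks.map (fun k => (k, p, l))) ++ rest).foldl (pvStep t) none
      = if ks.any (fun k => PySem.Chars.isIn k.toList t) then some (p, l)
        else rest.foldl (pvStep t) none := by
  induction ks with
  | nil => simp
  | cons k ks ih =>
      cases hk : PySem.Chars.isIn k.toList t with
      | true =>
          have hstep : pvStep t none (k, p, l) = some (p, l) := by simp [pvStep, hk]
          have hall : ∀ e ∈ (ks.map (fun k => (k, p, l))) ++ rest, p ≤ e.2.1 := by
            intro e he
            rcases List.mem_append.mp he with h | h
            · rcases List.mem_map.mp h with ⟨k', _, rfl⟩; exact le_refl p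
            · exact hrest e h
          simp [hstep, pv_stable t p l _ hall, hk]
      | false =>
          have hstep : pvStep t none (k, p, l) = none := by simp [pvStep, hk]
          simp [hstep, hk, ih]

-- The flat table is the seven uniform-priority groups in ascending priority order.
theorem pv_keywords_eq :
    pvKeywords
      = (["finance", "accounting", "revenue"].map (fun k => (k, 0, "Finance")))
        ++ ((["support", "customer", "help"].map (fun k => (k, 1, "Support")))
        ++ ((["sales", "marketing", "marketo"].map (fun k => (k, 2, "Sales & Marketing")))
        ++ ((["hr", "human resources"].map (fun k => (k, 3, "HR")))
        ++ ((["engineering", "development", "technical"].map (fun k => (k, 4, "Engineering")))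
        ++ ((["operations", "ops"].map (fun k => (k, 5, "Operations")))
        ++ ((["professional services", "ps team"].map (fun k => (k, 6, "Professional Services")))
        ++ ([] : List (String × Nat × String)))))))) := rfl

-- ===== VERDICT (by name: the statement is the Claim_ definition above) =====
theorem derive_business_unit_from_content_py_spec : Claim_equal_derive_business_unit_from_content_py := by
  intro row _
  unfold Spec_derive_business_unit_from_content_py derive_business_unit_from_content_py derive_business_unit_from_content_py_alt
  dsimp only
  generalize ((PySem.Str.lower ((PySem.Dict.mk row).getD "title" "")).toList
      ++ (PySem.Str.lower ((PySem.Dict.mk row).getD "description" "")).toList) = t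
  rw [pv_keywords_eq,
    pv_fold_group t 0 "Finance" _ _ (by decide)]
  cases List.any ["finance", "accounting", "revenue"] (fun k => PySem.Chars.isIn k.toList t) with
  | true => rfl
  | false =>
    simp only [Bool.false_eq_true, if_false]
    rw [pv_fold_group t 1 "Support" _ _ (by decide)]
    cases List.any ["support", "customer", "help"] (fun k => PySem.Chars.isIn k.toList t) with
    | true => rfl
    | false =>
      simp only [Bool.false_eq_true, if_false]
      rw [pv_fold_group t 2 "Sales & Marketing" _ _ (by decide)]
      cases List.any ["sales", "marketing", "marketo"] (fun k => PySem.Chars.isIn k.toList t) with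
      | true => rfl
      | false =>
        simp only [Bool.false_eq_true, if_false]
        rw [pv_fold_group t 3 "HR" _ _ (by decide)]
        cases List.any ["hr", "human resources"] (fun k => PySem.Chars.isIn k.toList t) with
        | true => rfl
        | false =>
          simp only [Bool.false_eq_true, if_false]
          rw [pv_fold_group t 4 "Engineering" _ _ (by decide)]
          cases List.any ["engineering", "development", "technical"] (fun k => PySem.Chars.isIn k.toList t) with
          | true => rfl
          | false =>
            simp only [Bool.false_eq_true, if_false]
            rw [pv_fold_group t 5 "Operations" _ _ (by decide)]
            cases List.any ["operations", "ops"] (fun k => PySem.Chars.isIn k.toList t) with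
            | true => rfl
            | false =>
              simp only [Bool.false_eq_true, if_false]
              rw [pv_fold_group t 6 "Professional Services" _ _ (by decide)]
              cases List.any ["professional services", "ps team"] (fun k => PySem.Chars.isIn k.toList t) with
              | true => rfl
              | false => simp
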